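-- pv_equiv track=rewrite | github.com/arsen-zaharenko/parallel_programming | lab_4.py | create_multimatrix
-- ===== SOURCE A (Python) =====
-- def create_multimatrix(matrices: list, P: int) -> list:
-- 	row_size = len(matrices[0][0])
-- 	column_size = len(matrices[0])
--
-- 	zero_matrix = [[0] * row_size for i in range(column_size)]
--
-- 	multimatrix = [matrices[i:] + [zero_matrix] * i if i else matrices for i in range(len(matrices))]
--
-- 	multimatrix_rows = [[] for i in range(column_size * len(multimatrix))]
--
-- 	for i, matrices in enumerate(multimatrix):
-- 		for j, matrix in enumerate(matrices):
-- 			for k, row in enumerate(matrix):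
-- 				multimatrix_rows[i * column_size + k].append(row)
--
-- 	multimatrix = [[] for i in range(column_size * len(multimatrix))]
-- 	for i, row in enumerate(multimatrix_rows):
-- 		for subrow in row:
-- 			multimatrix[i] += subrow
--
-- 	return multimatrix
-- ===== SOURCE B (Python) =====
-- def create_multimatrix(matrices: list, P: int) -> list:
--     row_size = len(matrices[0][0])
--     column_size = len(matrices[0])
--     n = len(matrices)
--     zero_row = [0] * row_size
--     # tag every source row with its (target row, block, position) key; matrix p
--     # appears in blocks 0..p, zero padding occupies positions n-i.. of block i>=1
--     entries = []
--     for p, m in enumerate(matrices):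
--         for k, row in enumerate(m):
--             for i in range(p + 1):
--                 entries.append(((i * column_size + k, i, p - i), row))
--     for i in range(1, n):
--         for j in range(n - i, n):
--             for k in range(column_size):
--                 entries.append(((i * column_size + k, i, j), zero_row))
--     entries.sort(key=lambda e: e[0])
--     result = [[] for _ in range(column_size * n)]
--     for key, row in entries:
--         result[key[0]] += row
--     return result
-- ===== Notes on version B (the rewrite author's own statement) =====
-- stated objective: alternative
-- what changed: B never builds A's skewed block list or bucket-scatter table: it tags each source row (and each padding zero row) with its (target row, block, position) key in one sweep over the input, sorts the tagged rows once by key, and fills the output with a single linear pass.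
import Mathlib
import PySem

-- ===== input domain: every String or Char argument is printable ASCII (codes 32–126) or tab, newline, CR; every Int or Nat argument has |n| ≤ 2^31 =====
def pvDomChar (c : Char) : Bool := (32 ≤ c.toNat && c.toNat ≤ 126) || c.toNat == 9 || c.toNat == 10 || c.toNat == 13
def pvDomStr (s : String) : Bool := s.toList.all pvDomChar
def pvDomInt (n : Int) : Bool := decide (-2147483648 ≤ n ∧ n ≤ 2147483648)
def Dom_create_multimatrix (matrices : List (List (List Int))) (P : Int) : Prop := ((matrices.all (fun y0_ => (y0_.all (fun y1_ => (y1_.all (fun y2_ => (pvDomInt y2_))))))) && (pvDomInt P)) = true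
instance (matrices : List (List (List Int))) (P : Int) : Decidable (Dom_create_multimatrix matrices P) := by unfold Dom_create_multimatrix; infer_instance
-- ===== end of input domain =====

-- B tags every source row with its (target row, block, position) key in one sweep over the
-- input, sorts the tagged rows once, and fills the result linearly — instead of A's
-- materialised skewed block list and bucket-append scatter passes (objective: alternative).

-- ===== PORT A =====
def create_multimatrix (matrices : List (List (List Int))) (P : Int) : List (List Int) :=
  let row_size := ((matrices.getD 0 []).getD 0 []).length
  let column_size := (matrices.getD 0 []).length
  let zero_matrix := (List.range column_size).map (fun _ => List.replicate row_size (0 : Int))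
  let multimatrix := (List.range matrices.length).map (fun i =>
    if i ≠ 0 then matrices.drop i ++ List.replicate i zero_matrix else matrices)
  let rows0 : List (List (List Int)) := (List.range (column_size * multimatrix.length)).map (fun _ => [])
  let rows := (PySem.List.enumerate multimatrix).foldl (fun acc p =>
    (PySem.List.enumerate p.2).foldl (fun acc2 q =>
      (PySem.List.enumerate q.2).foldl (fun acc3 r =>
        acc3.modify (p.1 * (column_size : Int) + r.1).toNat (fun b => b ++ [r.2])) acc2) acc) rows0
  rows.map (fun row => row.foldl (fun r sub => r ++ sub) [])

-- ===== PORT B =====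
def create_multimatrix_alt (matrices : List (List (List Int))) (P : Int) : List (List Int) :=
  let row_size := ((matrices.getD 0 []).getD 0 []).length
  let column_size := (matrices.getD 0 []).length
  let n := matrices.length
  let zero_row : List Int := List.replicate row_size 0
  let entries1 : List ((Int × Int × Int) × List Int) :=
    (PySem.List.enumerate matrices).foldl (fun acc pm =>
      (PySem.List.enumerate pm.2).foldl (fun acc2 kr =>
        (PySem.List.pyRange 0 (pm.1 + 1) 1).foldl (fun acc3 i =>
          acc3 ++ [((i * (column_size : Int) + kr.1, i, pm.1 - i), kr.2)]) acc2) acc) []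
  let entries2 : List ((Int × Int × Int) × List Int) :=
    (PySem.List.pyRange 1 (n : Int) 1).foldl (fun acc i =>
      (PySem.List.pyRange ((n : Int) - i) (n : Int) 1).foldl (fun acc2 j =>
        (PySem.List.pyRange 0 (column_size : Int) 1).foldl (fun acc3 k =>
          acc3 ++ [((i * (column_size : Int) + k, i, j), zero_row)]) acc2) acc) entries1
  -- Python compares the key tuples lexicographically: ported via the Lex order on products
  let entries := PySem.List.sorted entries2
    (fun e => toLex (e.1.1, toLex (e.1.2.1, e.1.2.2)))
  let result0 : List (List Int) := (List.range (column_size * n)).map (fun _ => ([] : List Int))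
  entries.foldl (fun res e => res.modify e.1.1.toNat (fun b => b ++ e.2)) result0

-- ===== PRECONDITION & SPEC =====
-- Pre_ excludes exactly the inputs on which A raises IndexError: an empty matrix list or an
-- empty matrices[0] (the dimension reads fail), and inputs where some matrices[p] has more
-- than column_size*(N-p) rows, so A's bucket index i*column_size+k falls past the row table.
def Pre_create_multimatrix (matrices : List (List (List Int))) (P : Int) : Prop :=
  matrices ≠ [] ∧ matrices.getD 0 [] ≠ [] ∧
    ∀ p ∈ List.range matrices.length,
      (matrices.getD p []).length ≤ (matrices.getD 0 []).length * (matrices.length - p)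
instance (matrices : List (List (List Int))) (P : Int) : Decidable (Pre_create_multimatrix matrices P) := by unfold Pre_create_multimatrix; infer_instance
def pvWitness_create_multimatrix : List (List (List Int)) × Int := ([[[1, 2], [3, 4]], [[5, 6], [7, 8]]], 0)

def Spec_create_multimatrix (matrices : List (List (List Int))) (P : Int) (out : List (List Int)) : Prop := out = create_multimatrix_alt matrices P
instance (matrices : List (List (List Int))) (P : Int) (out : List (List Int)) : Decidable (Spec_create_multimatrix matrices P out) := by unfold Spec_create_multimatrix; infer_instance

-- ===== CLAIM (what is proved, stated in full; the proofs are below) =====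
def Claim_equal_create_multimatrix : Prop := ∀ (matrices : List (List (List Int))) (P : Int), Dom_create_multimatrix matrices P → Pre_create_multimatrix matrices P → Spec_create_multimatrix matrices P (create_multimatrix matrices P)

-- ===== LEMMAS AND PROOFS =====

-- canonical tagged entry (all index components are casts of naturals)
def pvEnt (t i j : Nat) (row : List Int) : (Int × Int × Int) × List Int :=
  (((t : Int), (i : Int), (j : Int)), row)

-- the zero matrix, block-i matrix at position j, and the per-bucket entry group
def pvZm (cs rs : Nat) : List (List Int) :=
  (List.range cs).map (fun _ => List.replicate rs 0)

def pvBmat (ms : List (List (List Int))) (cs rs i j : Nat) : List (List Int) :=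
  if i + j < ms.length then ms.getD (i + j) [] else pvZm cs rs

def pvGrp (ms : List (List (List Int))) (cs rs n t : Nat) : List ((Int × Int × Int) × List Int) :=
  (List.range n).flatMap (fun i => (List.range n).flatMap (fun j =>
    if i * cs ≤ t ∧ t - i * cs < (pvBmat ms cs rs i j).length
    then [pvEnt t i j ((pvBmat ms cs rs i j).getD (t - i * cs) [])] else []))

def pvYs (ms : List (List (List Int))) (cs rs n : Nat) : List ((Int × Int × Int) × List Int) :=
  (List.range (cs * n)).flatMap (pvGrp ms cs rs n)

def pvKey (e : (Int × Int × Int) × List Int) : Lex (Int × Lex (Int × Int)) :=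
  toLex (e.1.1, toLex (e.1.2.1, e.1.2.2))

-- ---- generic list lemmas ----

theorem pv_perm_flatMap_congr {α β : Type} (l : List α) (f g : α → List β)
    (h : ∀ a ∈ l, (f a).Perm (g a)) : (l.flatMap f).Perm (l.flatMap g) := by
  induction l with
  | nil => simp
  | cons a tl ih =>
    simp only [List.flatMap_cons]
    exact (h a (by simp)).append (ih (fun x hx => h x (by simp [hx])))

theorem pv_perm_flatMap_append {α β : Type} (l : List α) (f g : α → List β) :
    (l.flatMap (fun a => f a ++ g a)).Perm (l.flatMap f ++ l.flatMap g) := by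
  induction l with
  | nil => simp
  | cons a tl ih =>
    simp only [List.flatMap_cons, List.append_assoc]
    refine List.Perm.append_left (f a) ?_
    exact (List.Perm.append_left (g a) ih).trans (List.perm_append_comm_assoc _ _ _)

theorem pv_perm_flatMap_swap {α β γ : Type} (l1 : List α) (l2 : List β) (f : α → β → List γ) :
    (l1.flatMap (fun a => l2.flatMap (fun b => f a b))).Perm
      (l2.flatMap (fun b => l1.flatMap (fun a => f a b))) := by
  induction l1 with
  | nil => simp
  | cons a tl ih =>
    simp only [List.flatMap_cons]
    exact (List.Perm.append_left _ ih).trans (pv_perm_flatMap_append l2 (f a) _).symm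

theorem pv_perm_triangle {β : Type} (n : Nat) (g : Nat → Nat → List β) :
    ((List.range n).flatMap (fun p => (List.range (p + 1)).flatMap (fun i => g p i))).Perm
      ((List.range n).flatMap (fun i => (List.range' i (n - i)).flatMap (fun p => g p i))) := by
  induction n with
  | zero => simp
  | succ n ih =>
    rw [List.range_succ, List.flatMap_append, List.flatMap_append, List.flatMap_singleton,
      List.flatMap_singleton]
    have hrhs : (List.range n).flatMap (fun i => (List.range' i (n + 1 - i)).flatMap (fun p => g p i))
        = (List.range n).flatMap (fun i => (List.range' i (n - i)).flatMap (fun p => g p i) ++ g n i) := by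
      refine List.flatMap_congr fun i hi => ?_
      rw [List.mem_range] at hi
      have h1 : n + 1 - i = (n - i) + 1 := by omega
      rw [h1, List.range'_concat, List.flatMap_append, List.flatMap_singleton]
      congr 2
      omega
    rw [hrhs]
    have h2 : List.range' n (n + 1 - n) = [n] := by
      have : n + 1 - n = 1 := by omega
      rw [this]
      simp [List.range'_succ]
    rw [h2, List.flatMap_singleton]
    have h3 : (List.range (n + 1)).flatMap (fun i => g n i)
        = (List.range n).flatMap (fun i => g n i) ++ g n n := by
      rw [List.range_succ, List.flatMap_append, List.flatMap_singleton]
    rw [h3, ← List.append_assoc]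
    refine List.Perm.append ?_ (List.Perm.refl (g n n))
    exact (ih.append (List.Perm.refl _)).trans
      (pv_perm_flatMap_append (List.range n) _ (fun i => g n i)).symm

theorem pv_pairwise_flatMap_range {β : Type} (N : Nat) (f : Nat → List β) (R : β → β → Prop)
    (h1 : ∀ x, x < N → (f x).Pairwise R)
    (h2 : ∀ x y, x < y → y < N → ∀ a ∈ f x, ∀ b ∈ f y, R a b) :
    ((List.range N).flatMap f).Pairwise R := by
  induction N with
  | zero => simp
  | succ n ih =>
    rw [List.range_succ, List.flatMap_append, List.flatMap_singleton, List.pairwise_append]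
    refine ⟨ih (fun x hx => h1 x (by omega)) (fun x y hxy hy => h2 x y hxy (by omega)),
      h1 n (by omega), ?_⟩
    intro a ha b hb
    rcases List.mem_flatMap.mp ha with ⟨x, hx, hax⟩
    exact h2 x n (List.mem_range.mp hx) (by omega) a hax b hb

theorem pv_interval {β : Type} (N a L : Nat) (g : Nat → List β) (h : a + L ≤ N) :
    (List.range N).flatMap (fun t => if a ≤ t ∧ t - a < L then g (t - a) else [])
      = (List.range L).flatMap g := by
  have e1 : List.range' 0 a ++ List.range' a L = List.range' 0 (a + L) := by
    have := @List.range'_append 0 a L 1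
    simpa using this
  have e2 : List.range' 0 (a + L) ++ List.range' (a + L) (N - a - L) = List.range' 0 N := by
    have := @List.range'_append 0 (a + L) (N - a - L) 1
    have h3 : a + L + (N - a - L) = N := by omega
    simpa [h3] using this
  have hsplit : List.range N = List.range' 0 a ++ List.range' a L ++ List.range' (a + L) (N - a - L) := by
    have h4 : List.range' 0 a ++ List.range' a L ++ List.range' (a + L) (N - a - L) = List.range N := by
      rw [e1, e2, List.range_eq_range']
    exact h4.symm
  rw [hsplit, List.flatMap_append, List.flatMap_append]
  have h1 : (List.range' 0 a).flatMap (fun t => if a ≤ t ∧ t - a < L then g (t - a) else []) = [] := by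
    rw [List.flatMap_eq_nil_iff]
    intro t ht
    rw [List.mem_range'_1] at ht
    rw [if_neg (by omega)]
  have h3 : (List.range' (a + L) (N - a - L)).flatMap (fun t => if a ≤ t ∧ t - a < L then g (t - a) else []) = [] := by
    rw [List.flatMap_eq_nil_iff]
    intro t ht
    rw [List.mem_range'_1] at ht
    rw [if_neg (by omega)]
  rw [h1, h3, List.nil_append, List.append_nil]
  rw [List.range'_eq_map_range, List.flatMap_map]
  refine List.flatMap_congr fun k hk => ?_
  rw [List.mem_range] at hk
  rw [if_pos ⟨by omega, by omega⟩]
  congr 1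
  omega

-- generic bucket-fill: the fold appends, in order, exactly the values aimed at index t
theorem pv_fill_get {α γ : Type} (idx : α → Nat) (val : α → List γ)
    (l : List α) (acc : List (List γ)) (t : Nat) :
    (l.foldl (fun a e => a.modify (idx e) (fun b => b ++ val e)) acc)[t]? =
      acc[t]?.map (fun b => b ++ (l.filter (fun e => idx e == t)).flatMap val) := by
  induction l generalizing acc with
  | nil => simp
  | cons hd tl ih =>
    rw [List.foldl_cons, ih, List.getElem?_modify, List.filter_cons]
    by_cases h : idx hd = t
    · simp only [h, beq_self_eq_true, if_true, List.flatMap_cons]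
      cases acc[t]? <;> simp
    · have hb : (idx hd == t) = false := by simp [h]
      simp only [hb, Bool.false_eq_true, if_false]
      cases acc[t]? <;> simp [h]

-- filtering one matrix's enumerated rows for bucket t (general, no cap on row counts)
theorem pv_filt_enum (cs t i : Nat) :
    ∀ (m : List (List Int)) (s : Nat),
    (((PySem.List.enumerate m (s : Int)).filter
        (fun r => ((i : Int) * (cs : Int) + r.1).toNat == t)).map (fun r => r.2))
      = if i * cs + s ≤ t ∧ t < i * cs + s + m.length then [m.getD (t - i * cs - s) []] else [] := by
  intro m
  induction m with
  | nil => intro s; simp [PySem.List.enumerate_nil]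
  | cons x tl ih =>
    intro s
    have hcast : ((i : Int) * (cs : Int) + (s : Int)).toNat = i * cs + s := by omega
    have hstep : (s : Int) + 1 = ((s + 1 : Nat) : Int) := by push_cast; ring
    have htl := ih (s + 1)
    rw [PySem.List.enumerate_cons, hstep, List.filter_cons]
    by_cases h : i * cs + s = t
    · have hb : (((i : Int) * (cs : Int) + (s : Int)).toNat == t) = true := by simp [hcast, h]
      simp only [hb, if_true, List.map_cons]
      have hno : ¬ (i * cs + (s + 1) ≤ t ∧ t < i * cs + (s + 1) + tl.length) := by omega
      have hyes : i * cs + s ≤ t ∧ t < i * cs + s + (x :: tl).length := by simp; omega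
      have hz : t - i * cs - s = 0 := by omega
      rw [htl, if_neg hno, if_pos hyes, hz]
      simp
    · have hb : (((i : Int) * (cs : Int) + (s : Int)).toNat == t) = false := by simp [hcast, h]
      simp only [hb, Bool.false_eq_true, if_false, htl]
      by_cases h2 : i * cs + s ≤ t ∧ t < i * cs + s + (x :: tl).length
      · have hc2 : i * cs + (s + 1) ≤ t ∧ t < i * cs + (s + 1) + tl.length := by
          simp at h2; omega
        have hd : t - i * cs - s = (t - i * cs - (s + 1)) + 1 := by omega
        rw [if_pos hc2, if_pos h2, hd, List.getD_cons_succ]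
      · have hc2 : ¬ (i * cs + (s + 1) ≤ t ∧ t < i * cs + (s + 1) + tl.length) := by
          simp at h2 ⊢; omega
        rw [if_neg hc2, if_neg h2]

-- enumerate over a flatMap as a range flatMap
theorem pv_enum_flatMap {α β : Type} (l : List α) (d : α) (f : Int × α → List β) :
    (PySem.List.enumerate l).flatMap f
      = (List.range l.length).flatMap (fun (u : Nat) => f ((u : Int), l.getD u d)) := by
  rw [PySem.List.enumerate_eq_map_pyRange l d, List.flatMap_map, PySem.List.pyRange_one]
  rw [List.flatMap_map]
  simp [PySem.List.pyGetD_natCast]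

-- canonical forms of B's two tag-emitting sweeps
def pvE1 (ms : List (List (List Int))) (cs : Nat) : List ((Int × Int × Int) × List Int) :=
  (List.range ms.length).flatMap (fun p =>
    (List.range (ms.getD p []).length).flatMap (fun k =>
      (List.range (p + 1)).flatMap (fun u =>
        [pvEnt (u * cs + k) u (p - u) ((ms.getD p []).getD k [])])))

def pvE2 (cs rs n : Nat) : List ((Int × Int × Int) × List Int) :=
  (List.range (n - 1)).flatMap (fun u =>
    (List.range (1 + u)).flatMap (fun v =>
      (List.range cs).flatMap (fun k =>
        [pvEnt ((1 + u) * cs + k) (1 + u) ((n - (1 + u)) + v) (List.replicate rs 0)])))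

-- block-structure facts
theorem pv_zm_len (cs rs : Nat) : (pvZm cs rs).length = cs := by simp [pvZm]

theorem pv_zm_getD (cs rs k : Nat) (hk : k < cs) :
    (pvZm cs rs).getD k [] = List.replicate rs 0 := by
  rw [pvZm, List.getD_eq_getElem _ _ (by simpa using hk)]
  simp

theorem pv_block_len (ms : List (List (List Int))) (cs rs i : Nat) (hi : i < ms.length) :
    (ms.drop i ++ List.replicate i (pvZm cs rs)).length = ms.length := by
  simp
  omega

theorem pv_block_getD (ms : List (List (List Int))) (cs rs i j : Nat)
    (hi : i < ms.length) (hj : j < ms.length) :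
    (ms.drop i ++ List.replicate i (pvZm cs rs)).getD j [] = pvBmat ms cs rs i j := by
  rw [pvBmat]
  by_cases h : i + j < ms.length
  · rw [if_pos h]
    have hj' : j < (ms.drop i).length := by simp; omega
    rw [List.getD_eq_getElem _ _ (by simp; omega), List.getElem_append_left hj',
      List.getElem_drop, List.getD_eq_getElem _ _ (by omega)]
  · rw [if_neg h]
    have hj' : (ms.drop i).length ≤ j := by simp; omega
    rw [List.getD_eq_getElem _ _ (by simp; omega), List.getElem_append_right hj']
    exact List.getElem_replicate ..

theorem pv_mm_getD (ms : List (List (List Int))) (cs rs i : Nat) (hi : i < ms.length) :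
    ((List.range ms.length).map (fun i =>
        if i ≠ 0 then ms.drop i ++ List.replicate i (pvZm cs rs) else ms)).getD i []
      = ms.drop i ++ List.replicate i (pvZm cs rs) := by
  rw [List.getD_eq_getElem _ _ (by simpa using hi)]
  simp only [List.getElem_map, List.getElem_range]
  by_cases h : i = 0
  · subst h; simp
  · rw [if_pos h]

-- casts of Python ranges
theorem pv_pyRange_cast (a b : Nat) :
    PySem.List.pyRange (a : Int) (b : Int) = (List.range (b - a)).map (fun (v : Nat) => ((a + v : Nat) : Int)) := by
  rw [PySem.List.pyRange_one]
  have : ((b : Int) - (a : Int)).toNat = b - a := by omega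
  rw [this]
  refine List.map_congr_left fun v _ => ?_
  push_cast
  ring

-- foldl-append is prepend-to-flatten
theorem pv_foldl_append (l : List (List Int)) (acc : List Int) :
    l.foldl (fun r sub => r ++ sub) acc = acc ++ l.flatten := by
  induction l generalizing acc with
  | nil => simp
  | cons x tl ih => simp [List.foldl_cons, ih]

theorem pv_flatMap_sing {α β : Type} (l : List α) (f : α → β) :
    (l.flatMap (fun x => [f x])) = l.map f := by
  induction l with
  | nil => rfl
  | cons a tl ih => simp [ih]

-- A's filtered tagged stream for bucket t is exactly the canonical group's row list
theorem pv_A_bucket (ms : List (List (List Int))) (cs rs n : Nat)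
    (hn : n = ms.length) (t : Nat) :
    ((((PySem.List.enumerate ((List.range n).map (fun i =>
          if i ≠ 0 then ms.drop i ++ List.replicate i (pvZm cs rs) else ms))).flatMap (fun p =>
        ((PySem.List.enumerate p.2).flatMap (fun q => PySem.List.enumerate q.2)).map
          (fun r => ((p.1 * (cs : Int) + r.1).toNat, r.2)))).filter
            (fun e => e.1 == t)).flatMap (fun e => [e.2]))
      = (pvGrp ms cs rs n t).map (fun e => e.2) := by
  subst hn
  set mm := (List.range ms.length).map (fun i =>
    if i ≠ 0 then ms.drop i ++ List.replicate i (pvZm cs rs) else ms) with hmm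
  have hmmlen : mm.length = ms.length := by rw [hmm]; simp
  rw [List.filter_flatMap, List.flatMap_assoc]
  rw [pv_enum_flatMap mm []]
  have hgrp : (pvGrp ms cs rs ms.length t).map (fun e => e.2)
      = (List.range ms.length).flatMap (fun i => (List.range ms.length).flatMap (fun j =>
          if i * cs ≤ t ∧ t - i * cs < (pvBmat ms cs rs i j).length
          then [(pvBmat ms cs rs i j).getD (t - i * cs) []] else [])) := by
    simp only [pvGrp, List.map_flatMap, apply_ite (List.map (fun (e : (Int × Int × Int) × List Int) => e.2)), List.map_cons, List.map_nil]
    rfl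
  rw [hgrp, hmmlen]
  refine List.flatMap_congr fun u hu => ?_
  rw [List.mem_range] at hu
  have hblockD : mm.getD u [] = ms.drop u ++ List.replicate u (pvZm cs rs) :=
    pv_mm_getD ms cs rs u hu
  have hblen : (mm.getD u []).length = ms.length := by
    rw [hblockD]; exact pv_block_len ms cs rs u hu
  simp only [List.filter_map, List.flatMap_map, Function.comp_def, List.filter_flatMap,
    List.flatMap_assoc]
  rw [pv_enum_flatMap (mm.getD u []) []]
  rw [hblen]
  refine List.flatMap_congr fun j hj => ?_
  rw [List.mem_range] at hj
  have hbm : (mm.getD u []).getD j [] = pvBmat ms cs rs u j := by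
    rw [hblockD]; exact pv_block_getD ms cs rs u j hu hj
  rw [hbm]
  rw [show ((↑j : Int), pvBmat ms cs rs u j).2 = pvBmat ms cs rs u j from rfl]
  rw [pv_flatMap_sing]
  have hfilt := pv_filt_enum cs t u (pvBmat ms cs rs u j) 0
  rw [Nat.cast_zero] at hfilt
  rw [hfilt]
  by_cases hc : u * cs ≤ t ∧ t - u * cs < (pvBmat ms cs rs u j).length
  · rw [if_pos (by omega), if_pos hc]
    simp
  · rw [if_neg (by omega), if_neg hc]

-- A's output, row by row
theorem pv_A_get (ms : List (List (List Int))) (P : Int) (t : Nat) :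
    (create_multimatrix ms P)[t]? =
      if t < (ms.getD 0 []).length * ms.length then
        some ((pvGrp ms (ms.getD 0 []).length ((ms.getD 0 []).getD 0 []).length ms.length t).flatMap
          (fun e => e.2))
      else none := by
  simp only [create_multimatrix]
  set cs := (ms.getD 0 []).length with hcs
  set rs := ((ms.getD 0 []).getD 0 []).length with hrs
  set n := ms.length with hn
  rw [show (List.range cs).map (fun _ => List.replicate rs (0 : Int)) = pvZm cs rs from rfl]
  set mm := (List.range n).map (fun i =>
    if i ≠ 0 then ms.drop i ++ List.replicate i (pvZm cs rs) else ms) with hmm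
  set rows0 := (List.range (cs * mm.length)).map (fun _ => ([] : List (List Int))) with hrows0
  have hmmlen : mm.length = n := by rw [hmm]; simp
  have hfold :
      (PySem.List.enumerate mm).foldl (fun acc p =>
        (PySem.List.enumerate p.2).foldl (fun acc2 q =>
          (PySem.List.enumerate q.2).foldl (fun acc3 r =>
            acc3.modify (p.1 * (cs : Int) + r.1).toNat (fun b => b ++ [r.2])) acc2) acc) rows0
      = ((PySem.List.enumerate mm).flatMap (fun p =>
          ((PySem.List.enumerate p.2).flatMap (fun q => PySem.List.enumerate q.2)).map
            (fun r => ((p.1 * (cs : Int) + r.1).toNat, r.2)))).foldl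
          (fun a r => a.modify r.1 (fun b => b ++ [r.2])) rows0 := by
    simp only [List.foldl_flatMap, List.foldl_map]
  rw [hfold, List.getElem?_map]
  rw [pv_fill_get (fun (e : Nat × List Int) => e.1) (fun e => [e.2])]
  rw [pv_A_bucket ms cs rs n hn t]
  by_cases ht : t < cs * n
  · rw [if_pos ht]
    rw [hrows0, List.getElem?_map, List.getElem?_range (by rw [hmmlen]; exact ht)]
    simp only [Option.map_some, List.nil_append]
    rw [pv_foldl_append, List.nil_append, ← List.flatMap_def]
  · rw [if_neg ht]
    rw [hrows0, List.getElem?_map,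
      List.getElem?_eq_none (by rw [List.length_range, hmmlen]; omega)]
    rfl

theorem pv_mem_ite_chunk {γ : Type} (N : Nat) (c : Nat → Prop) [DecidablePred c]
    (x : Nat → γ) (e : γ) (h : e ∈ (List.range N).flatMap (fun j => if c j then [x j] else [])) :
    ∃ j, j < N ∧ e = x j := by
  rcases List.mem_flatMap.mp h with ⟨j, hj, hin⟩
  rw [List.mem_range] at hj
  refine ⟨j, hj, ?_⟩
  split at hin
  · simpa using hin
  · simp at hin

theorem pv_mem_grp (ms : List (List (List Int))) (cs rs n t : Nat)
    (e : (Int × Int × Int) × List Int) (h : e ∈ pvGrp ms cs rs n t) :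
    ∃ i j, i < n ∧ j < n ∧ e = pvEnt t i j ((pvBmat ms cs rs i j).getD (t - i * cs) []) := by
  rcases List.mem_flatMap.mp h with ⟨i, hi, hin⟩
  rw [List.mem_range] at hi
  rcases pv_mem_ite_chunk n _ _ e hin with ⟨j, hj, he⟩
  exact ⟨i, j, hi, hj, he⟩

theorem pv_key_ent (t i j : Nat) (r : List Int) :
    pvKey (pvEnt t i j r) = toLex ((t : Int), toLex ((i : Int), (j : Int))) := rfl

theorem pv_pairwise_ys (ms : List (List (List Int))) (cs rs n : Nat) :
    (pvYs ms cs rs n).Pairwise (fun a b => pvKey a < pvKey b) := by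
  refine pv_pairwise_flatMap_range _ _ _ (fun t ht => ?_) (fun t1 t2 h12 h2N a ha b hb => ?_)
  · refine pv_pairwise_flatMap_range _ _ _ (fun i hi => ?_) (fun i1 i2 h12 hi2 a ha b hb => ?_)
    · refine pv_pairwise_flatMap_range _ _ _ (fun j hj => ?_) (fun j1 j2 h12 hj2 a ha b hb => ?_)
      · split <;> simp
      · have hea : a = pvEnt t i j1 ((pvBmat ms cs rs i j1).getD (t - i * cs) []) := by
          split at ha
          · simpa using ha
          · simp at ha
        have heb : b = pvEnt t i j2 ((pvBmat ms cs rs i j2).getD (t - i * cs) []) := by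
          split at hb
          · simpa using hb
          · simp at hb
        rw [hea, heb, pv_key_ent, pv_key_ent]
        refine Prod.Lex.toLex_lt_toLex.mpr (Or.inr ⟨rfl, ?_⟩)
        exact Prod.Lex.toLex_lt_toLex.mpr (Or.inr ⟨rfl, show (j1 : Int) < (j2 : Int) by exact_mod_cast h12⟩)
    · rcases pv_mem_ite_chunk n _ _ a ha with ⟨j1, hj1, hea⟩
      rcases pv_mem_ite_chunk n _ _ b hb with ⟨j2, hj2, heb⟩
      rw [hea, heb, pv_key_ent, pv_key_ent]
      refine Prod.Lex.toLex_lt_toLex.mpr (Or.inr ⟨rfl, ?_⟩)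
      exact Prod.Lex.toLex_lt_toLex.mpr (Or.inl (show (i1 : Int) < (i2 : Int) by exact_mod_cast h12))
  · rcases pv_mem_grp ms cs rs n t1 a ha with ⟨i1, j1, _, _, hea⟩
    rcases pv_mem_grp ms cs rs n t2 b hb with ⟨i2, j2, _, _, heb⟩
    rw [hea, heb, pv_key_ent, pv_key_ent]
    exact Prod.Lex.toLex_lt_toLex.mpr (Or.inl (show (t1 : Int) < (t2 : Int) by exact_mod_cast h12))

theorem pv_flatMap_range_at {γ : Type} (N t : Nat) (f : Nat → List γ) (ht : t < N) :
    (List.range N).flatMap (fun x => if x = t then f x else []) = f t := by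
  induction N with
  | zero => omega
  | succ m ih =>
    rw [List.range_succ, List.flatMap_append, List.flatMap_singleton]
    by_cases h : m = t
    · rw [if_pos h]
      have hnil : (List.range m).flatMap (fun x => if x = t then f x else []) = [] := by
        rw [List.flatMap_eq_nil_iff]
        intro x hx
        rw [List.mem_range] at hx
        rw [if_neg (by omega)]
      rw [hnil, List.nil_append, h]
    · rw [if_neg h, ih (by omega), List.append_nil]

theorem pv_ys_filter (ms : List (List (List Int))) (cs rs n t : Nat) (ht : t < cs * n) :
    (pvYs ms cs rs n).filter (fun e => e.1.1.toNat == t) = pvGrp ms cs rs n t := by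
  rw [pvYs, List.filter_flatMap]
  have h : ∀ t' ∈ List.range (cs * n),
      (pvGrp ms cs rs n t').filter (fun e => e.1.1.toNat == t)
        = if t' = t then pvGrp ms cs rs n t' else [] := by
    intro t' _
    by_cases he : t' = t
    · rw [if_pos he]
      refine List.filter_eq_self.mpr fun e hin => ?_
      rcases pv_mem_grp ms cs rs n t' e hin with ⟨i, j, _, _, hee⟩
      rw [hee]
      simp [pvEnt, he]
    · rw [if_neg he]
      refine List.filter_eq_nil_iff.mpr fun e hin => ?_
      rcases pv_mem_grp ms cs rs n t' e hin with ⟨i, j, _, _, hee⟩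
      rw [hee]
      simp [pvEnt, he]
  rw [List.flatMap_congr h, pv_flatMap_range_at _ t _ ht]

-- the tag lists B emits are a permutation of the key-sorted canonical list
theorem pv_perm_ys (ms : List (List (List Int))) (cs rs n : Nat)
    (hn : n = ms.length)
    (hpre : ∀ p, p < n → (ms.getD p []).length ≤ cs * (n - p)) :
    (pvYs ms cs rs n).Perm (pvE1 ms cs ++ pvE2 cs rs n) := by
  -- move the bucket loop innermost
  have h1 : (pvYs ms cs rs n).Perm
      ((List.range n).flatMap (fun i => (List.range n).flatMap (fun j =>
        (List.range (cs * n)).flatMap (fun t =>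
          if i * cs ≤ t ∧ t - i * cs < (pvBmat ms cs rs i j).length
          then [pvEnt t i j ((pvBmat ms cs rs i j).getD (t - i * cs) [])] else [])))) := by
    refine (pv_perm_flatMap_swap (List.range (cs * n)) (List.range n) _).trans ?_
    exact pv_perm_flatMap_congr _ _ _ (fun i _ =>
      pv_perm_flatMap_swap (List.range (cs * n)) (List.range n) _)
  -- collapse the bucket loop to the rows that exist
  have h2 : ∀ i j, i < n → j < n →
      (List.range (cs * n)).flatMap (fun t =>
          if i * cs ≤ t ∧ t - i * cs < (pvBmat ms cs rs i j).length
          then [pvEnt t i j ((pvBmat ms cs rs i j).getD (t - i * cs) [])] else [])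
        = (List.range (pvBmat ms cs rs i j).length).flatMap (fun k =>
            [pvEnt (i * cs + k) i j ((pvBmat ms cs rs i j).getD k [])]) := by
    intro i j hi hj
    have hb : i * cs + (pvBmat ms cs rs i j).length ≤ cs * n := by
      rw [pvBmat]
      by_cases h : i + j < ms.length
      · rw [if_pos h]
        have hp := hpre (i + j) (by omega)
        have h4 : i * cs + cs * (n - (i + j)) ≤ cs * n := by
          rw [Nat.mul_comm i cs, ← Nat.mul_add]
          exact Nat.mul_le_mul_left cs (by omega)
        omega
      · rw [if_neg h, pv_zm_len]
        have h4 : (i + 1) * cs ≤ n * cs := Nat.mul_le_mul_right cs (by omega)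
        have h5 : (i + 1) * cs = i * cs + cs := by ring
        rw [Nat.mul_comm cs n]
        omega
    have hcongr : ∀ t ∈ List.range (cs * n),
        (if i * cs ≤ t ∧ t - i * cs < (pvBmat ms cs rs i j).length
          then [pvEnt t i j ((pvBmat ms cs rs i j).getD (t - i * cs) [])] else [])
        = (if i * cs ≤ t ∧ t - i * cs < (pvBmat ms cs rs i j).length
          then [pvEnt (i * cs + (t - i * cs)) i j ((pvBmat ms cs rs i j).getD (t - i * cs) [])] else []) := by
      intro t _
      split_ifs with hcnd
      · rw [show i * cs + (t - i * cs) = t from by omega]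
      · rfl
    rw [List.flatMap_congr hcongr]
    exact pv_interval (cs * n) (i * cs) (pvBmat ms cs rs i j).length
      (fun k => [pvEnt (i * cs + k) i j ((pvBmat ms cs rs i j).getD k [])]) hb
  -- split real and padding positions and reshape each side
  have h4 : ∀ i ∈ List.range n,
      (List.range n).flatMap (fun j => (List.range (pvBmat ms cs rs i j).length).flatMap (fun k =>
          [pvEnt (i * cs + k) i j ((pvBmat ms cs rs i j).getD k [])]))
        = ((List.range (n - i)).flatMap (fun j =>
            (List.range (ms.getD (i + j) []).length).flatMap (fun k =>
              [pvEnt (i * cs + k) i j ((ms.getD (i + j) []).getD k [])])))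
          ++ ((List.range' (n - i) i).flatMap (fun j =>
            (List.range cs).flatMap (fun k =>
              [pvEnt (i * cs + k) i j (List.replicate rs 0)]))) := by
    intro i hi
    rw [List.mem_range] at hi
    have hsplit : List.range n = List.range (n - i) ++ List.range' (n - i) i := by
      have hap := @List.range'_append 0 (n - i) i 1
      simp only [Nat.one_mul, Nat.zero_add] at hap
      have e : List.range' 0 (n - i + i) = List.range' 0 n := by
        rw [show n - i + i = n from by omega]
      rw [List.range_eq_range', ← e, ← hap, ← List.range_eq_range']
    rw [hsplit, List.flatMap_append]
    congr 1
    · refine List.flatMap_congr fun j hj => ?_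
      rw [List.mem_range] at hj
      have hb : pvBmat ms cs rs i j = ms.getD (i + j) [] := by
        rw [pvBmat, if_pos (by omega)]
      rw [hb]
    · refine List.flatMap_congr fun j hj => ?_
      rw [List.mem_range'_1] at hj
      have hb : pvBmat ms cs rs i j = pvZm cs rs := by
        rw [pvBmat, if_neg (by omega)]
      rw [hb, pv_zm_len]
      refine List.flatMap_congr fun k hk => ?_
      rw [List.mem_range] at hk
      rw [pv_zm_getD cs rs k hk]
  -- padding side equals the canonical second sweep
  have h6 : (List.range n).flatMap (fun i =>
        (List.range' (n - i) i).flatMap (fun j =>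
          (List.range cs).flatMap (fun k => [pvEnt (i * cs + k) i j (List.replicate rs 0)])))
      = pvE2 cs rs n := by
    rw [pvE2]
    cases n with
    | zero => simp
    | succ m =>
      have hcons : List.range (m + 1) = 0 :: List.range' 1 m := by
        rw [List.range_eq_range', List.range'_succ]
      rw [hcons, List.flatMap_cons]
      have hz : (List.range' (m + 1 - 0) 0).flatMap (fun j =>
          (List.range cs).flatMap (fun k => [pvEnt (0 * cs + k) 0 j (List.replicate rs 0)])) = [] := by
        simp
      rw [hz, List.nil_append, List.range'_eq_map_range, List.flatMap_map]
      have hm : m + 1 - 1 = m := by omega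
      rw [hm]
      refine List.flatMap_congr fun u hu => ?_
      rw [List.range'_eq_map_range, List.flatMap_map]
  -- real side is a permutation of the canonical first sweep
  have h7 : (pvE1 ms cs).Perm ((List.range n).flatMap (fun i =>
      (List.range (n - i)).flatMap (fun j =>
        (List.range (ms.getD (i + j) []).length).flatMap (fun k =>
          [pvEnt (i * cs + k) i j ((ms.getD (i + j) []).getD k [])])))) := by
    rw [pvE1, ← hn]
    refine (pv_perm_flatMap_congr (List.range n) _ _ (fun p _ =>
      pv_perm_flatMap_swap (List.range (ms.getD p []).length) (List.range (p + 1)) _)).trans ?_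
    refine (pv_perm_triangle n (fun p u => (List.range (ms.getD p []).length).flatMap (fun k =>
      [pvEnt (u * cs + k) u (p - u) ((ms.getD p []).getD k [])]))).trans ?_
    refine List.Perm.of_eq ?_
    refine List.flatMap_congr fun u hu => ?_
    rw [List.range'_eq_map_range, List.flatMap_map]
    refine List.flatMap_congr fun j hj => ?_
    rw [show u + j - u = j from by omega]
  -- assemble
  refine h1.trans ?_
  have h3 : (List.range n).flatMap (fun i => (List.range n).flatMap (fun j =>
        (List.range (cs * n)).flatMap (fun t =>
          if i * cs ≤ t ∧ t - i * cs < (pvBmat ms cs rs i j).length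
          then [pvEnt t i j ((pvBmat ms cs rs i j).getD (t - i * cs) [])] else [])))
      = (List.range n).flatMap (fun i =>
          ((List.range (n - i)).flatMap (fun j =>
            (List.range (ms.getD (i + j) []).length).flatMap (fun k =>
              [pvEnt (i * cs + k) i j ((ms.getD (i + j) []).getD k [])])))
          ++ ((List.range' (n - i) i).flatMap (fun j =>
            (List.range cs).flatMap (fun k =>
              [pvEnt (i * cs + k) i j (List.replicate rs 0)])))) := by
    refine List.flatMap_congr fun i hi => ?_
    rw [List.mem_range] at hi
    rw [List.flatMap_congr (fun j hj => h2 i j hi (List.mem_range.mp hj))]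
    exact h4 i (List.mem_range.mpr hi)
  rw [h3]
  refine (pv_perm_flatMap_append (List.range n) _ _).trans ?_
  rw [h6]
  exact List.Perm.append h7.symm (List.Perm.refl _)
-- B's first sweep, canonicalised
theorem pv_E1_conv (ms : List (List (List Int))) (cs : Nat) :
    (PySem.List.enumerate ms).flatMap (fun pm =>
        (PySem.List.enumerate pm.2).flatMap (fun kr =>
          (PySem.List.pyRange 0 (pm.1 + 1) 1).flatMap (fun i =>
            [((i * (cs : Int) + kr.1, i, pm.1 - i), kr.2)])))
      = pvE1 ms cs := by
  rw [pv_enum_flatMap ms []]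
  rw [pvE1]
  refine List.flatMap_congr fun p hp => ?_
  rw [List.mem_range] at hp
  rw [pv_enum_flatMap (ms.getD p []) []]
  refine List.flatMap_congr fun k hk => ?_
  rw [show ((p : Nat) : Int) + 1 = (((p + 1 : Nat)) : Int) from by push_cast; ring]
  rw [show (0 : Int) = ((0 : Nat) : Int) from rfl, pv_pyRange_cast 0 (p + 1), List.flatMap_map]
  rw [Nat.sub_zero]
  refine List.flatMap_congr fun u hu => ?_
  rw [List.mem_range] at hu
  simp only [pvEnt, Prod.mk.injEq, List.cons.injEq, and_true]
  refine ⟨by push_cast; ring, by push_cast; ring, by omega⟩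

-- B's second sweep, canonicalised
theorem pv_E2_conv (cs rs n : Nat) :
    (PySem.List.pyRange 1 (n : Int) 1).flatMap (fun i =>
        (PySem.List.pyRange ((n : Int) - i) (n : Int) 1).flatMap (fun j =>
          (PySem.List.pyRange 0 (cs : Int) 1).flatMap (fun k =>
            [((i * (cs : Int) + k, i, j), List.replicate rs (0 : Int))])))
      = pvE2 cs rs n := by
  rw [show PySem.List.pyRange 1 (n : Int) 1
      = PySem.List.pyRange ((1 : Nat) : Int) ((n : Nat) : Int) 1 from by norm_num]
  rw [pv_pyRange_cast 1 n, List.flatMap_map]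
  rw [pvE2]
  refine List.flatMap_congr fun u hu => ?_
  rw [List.mem_range] at hu
  have hij : ((n : Int) - ((1 + u : Nat) : Int)) = ((n - (1 + u) : Nat) : Int) := by omega
  rw [hij, pv_pyRange_cast (n - (1 + u)) n, List.flatMap_map]
  have hcnt : n - (n - (1 + u)) = 1 + u := by omega
  rw [hcnt]
  refine List.flatMap_congr fun v hv => ?_
  rw [show PySem.List.pyRange 0 (cs : Int) 1
      = PySem.List.pyRange ((0 : Nat) : Int) ((cs : Nat) : Int) 1 from by norm_num]
  rw [pv_pyRange_cast 0 cs, List.flatMap_map]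
  rw [Nat.sub_zero]
  refine List.flatMap_congr fun k hk => ?_
  simp only [pvEnt, Prod.mk.injEq, List.cons.injEq, and_true]
  push_cast
  ring

-- B's output, row by row
theorem pv_B_get (ms : List (List (List Int))) (P : Int) (t : Nat)
    (hpre : ∀ p, p < ms.length →
      (ms.getD p []).length ≤ (ms.getD 0 []).length * (ms.length - p)) :
    (create_multimatrix_alt ms P)[t]? =
      if t < (ms.getD 0 []).length * ms.length then
        some ((pvGrp ms (ms.getD 0 []).length ((ms.getD 0 []).getD 0 []).length ms.length t).flatMap
          (fun e => e.2))
      else none := by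
  simp only [create_multimatrix_alt]
  set cs := (ms.getD 0 []).length with hcs
  set rs := ((ms.getD 0 []).getD 0 []).length with hrs
  simp only [PySem.List.foldl_append_eq_flatMap]
  rw [List.nil_append, pv_E1_conv ms cs, pv_E2_conv cs rs ms.length]
  have hpre' : ∀ p, p < ms.length → (ms.getD p []).length ≤ cs * (ms.length - p) := hpre
  have hsort : PySem.List.sorted (pvE1 ms cs ++ pvE2 cs rs ms.length)
      (fun e => toLex (e.1.1, toLex (e.1.2.1, e.1.2.2)))
      = pvYs ms cs rs ms.length := by
    refine PySem.List.sorted_eq_of_perm_of_pairwise_lt _ _ _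
      (pv_perm_ys ms cs rs ms.length rfl hpre') ?_
    exact pv_pairwise_ys ms cs rs ms.length
  rw [hsort]
  rw [pv_fill_get (fun (e : (Int × Int × Int) × List Int) => e.1.1.toNat) (fun e => e.2)]
  by_cases ht : t < cs * ms.length
  · rw [if_pos ht]
    rw [List.getElem?_map, List.getElem?_range ht]
    rw [pv_ys_filter ms cs rs ms.length t ht]
    simp
  · rw [if_neg ht]
    rw [List.getElem?_map, List.getElem?_eq_none (by rw [List.length_range]; omega)]
    rfl

-- ===== VERDICT (by name: the statement is the Claim_ definition above) =====
theorem create_multimatrix_spec : Claim_equal_create_multimatrix := by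
  intro ms P _ hpre
  obtain ⟨hne, hhd, hp3⟩ := hpre
  show create_multimatrix ms P = create_multimatrix_alt ms P
  refine List.ext_getElem? fun t => ?_
  rw [pv_A_get ms P t, pv_B_get ms P t (fun p hp => hp3 p (List.mem_range.mpr hp))]
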